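-- pv_equiv track=rewrite | github.com/marcus-aurelianus/codeforce | round704/findN.py | printNthElement2
-- ===== SOURCE A (Python) =====
-- def printNthElement2(n) :
--     ans = []
--     while n>=1:
--         if n&1:
--             ans.append('4')
--             n = (n-1)//2
--         else:
--             n = n//2-1
--             ans.append('7')
--     return int(''.join(ans))
-- ===== SOURCE B (Python) =====
-- def printNthElement2(n):
--     # length-then-index decomposition: find the digit count k, then read the
--     # binary expansion of the in-group offset m (LSB first, matching A's order).
--     k = 0
--     while 2 ** (k + 1) - 2 < n:
--         k += 1
--     m = n - (2 ** k - 1)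
--     digits = ['7' if (m // 2 ** i) % 2 else '4' for i in range(k)]
--     return int(''.join(digits))
-- ===== Notes on version B (the rewrite author's own statement) =====
-- stated objective: alternative
-- what changed: A peels bijective-base-2 digits off n in one destructive loop; B first finds the digit count k (smallest k with 2^(k+1)-2 >= n), computes the in-group offset m = n-(2^k-1), and reads the digits directly from m's binary expansion with a range(k) comprehension.
-- outside the precondition, e.g. on printNthElement2(0): A raises ValueError, B raises ValueError
import Mathlib
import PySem

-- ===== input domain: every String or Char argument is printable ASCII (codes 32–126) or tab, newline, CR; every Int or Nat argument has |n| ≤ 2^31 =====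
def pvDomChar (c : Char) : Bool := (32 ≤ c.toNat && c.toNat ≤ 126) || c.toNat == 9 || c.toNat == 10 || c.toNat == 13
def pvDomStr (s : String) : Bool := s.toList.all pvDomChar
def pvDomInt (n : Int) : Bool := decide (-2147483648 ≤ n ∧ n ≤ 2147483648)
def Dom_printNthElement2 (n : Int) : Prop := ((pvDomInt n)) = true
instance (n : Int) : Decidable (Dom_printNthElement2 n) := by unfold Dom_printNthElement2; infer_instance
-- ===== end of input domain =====

-- B replaces A's single digit-peeling loop by a length-finding pass plus a direct
-- binary-expansion read-off of the in-group offset (alternative decomposition, same cost).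

-- ===== PORT A =====
-- the while loop of A: appends '4'/'7' while n >= 1 (list kept in append order)
def pvLoopA (n : Int) : List Char :=
  if h : 1 ≤ n then
    if PySem.Int.mod n 2 = 1 then          -- if n&1:  (n ≥ 1 here, so n&1 = n % 2)
      '4' :: pvLoopA (PySem.Int.floordiv (n - 1) 2)
    else
      '7' :: pvLoopA (PySem.Int.floordiv n 2 - 1)
  else []
termination_by n.toNat
decreasing_by
  · rw [PySem.Int.floordiv_eq_ediv_of_pos (by omega)]; omega
  · rw [PySem.Int.floordiv_eq_ediv_of_pos (by omega)]; omega

-- int(''.join(ans)); int('') raises ValueError (only when n ≤ 0), excluded by Pre_ — .getD 0 is unreachable there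
def printNthElement2 (n : Int) : Int :=
  (PySem.Int.ofStr? (String.mk (pvLoopA n))).getD 0

-- ===== PORT B =====
-- while 2**(k+1) - 2 < n: k += 1
def pvFindK (n : Int) (k : Nat) : Nat :=
  if (2 : Int) ^ (k + 1) - 2 < n then pvFindK n (k + 1) else k
termination_by n.toNat - k
decreasing_by
  have hk : k + 2 ≤ 2 ^ (k + 1) := Nat.lt_two_pow_self
  have hk' : ((k : Int)) + 2 ≤ (2 : Int) ^ (k + 1) := by exact_mod_cast hk
  omega

-- ['7' if (m // 2**i) % 2 else '4' for i in range(k)]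
def pvDigitsB (m : Int) (k : Nat) : List Char :=
  (List.range k).map
    (fun i => if PySem.Int.mod (PySem.Int.floordiv m (2 ^ i)) 2 ≠ 0 then '7' else '4')

def printNthElement2_alt (n : Int) : Int :=
  let k := pvFindK n 0
  let m := n - ((2 : Int) ^ k - 1)
  (PySem.Int.ofStr? (String.mk (pvDigitsB m k))).getD 0

-- ===== PRECONDITION & SPEC =====
-- Pre_ excludes exactly n ≤ 0, where A (and B) raise ValueError from int('')
def Pre_printNthElement2 (n : Int) : Prop := 1 ≤ n
instance (n : Int) : Decidable (Pre_printNthElement2 n) := by unfold Pre_printNthElement2; infer_instance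
def pvWitness_printNthElement2 : Int := 5
def Spec_printNthElement2 (n : Int) (out : Int) : Prop := out = printNthElement2_alt n
instance (n : Int) (out : Int) : Decidable (Spec_printNthElement2 n out) := by unfold Spec_printNthElement2; infer_instance

-- ===== CLAIM (what is proved, stated in full; the proofs are below) =====
def Claim_equal_printNthElement2 : Prop := ∀ (n : Int), Dom_printNthElement2 n → Pre_printNthElement2 n → Spec_printNthElement2 n (printNthElement2 n)

-- ===== LEMMAS AND PROOFS =====

-- pvFindK returns the unique k with 2^k - 2 < n ≤ 2^(k+1) - 2 (given the lower bound holds at the start)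
theorem pvFindK_bounds (n : Int) (k : Nat) (h : (2 : Int) ^ k - 2 < n) :
    (2 : Int) ^ (pvFindK n k) - 2 < n ∧ n ≤ (2 : Int) ^ (pvFindK n k + 1) - 2 := by
  fun_induction pvFindK n k with
  | case1 k hlt ih => exact ih hlt
  | case2 k hle => exact ⟨h, by omega⟩

-- unfolding one digit of B's read-off
theorem pvDigitsB_succ (m : Int) (k : Nat) :
    pvDigitsB m (k + 1) =
      (if PySem.Int.mod m 2 ≠ 0 then '7' else '4') :: pvDigitsB (PySem.Int.floordiv m 2) k := by
  unfold pvDigitsB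
  rw [List.range_succ_eq_map, List.map_cons, List.map_map]
  congr 1
  · rw [pow_zero, PySem.Int.floordiv_eq_ediv_of_pos (by omega), Int.ediv_one]
  · apply List.map_congr_left
    intro i _
    have h1 : m / 2 ^ (i + 1) = m / 2 / 2 ^ i := by
      rw [Int.ediv_ediv_of_nonneg (x := m) (by norm_num : (0:Int) ≤ 2)]
      congr 1
      ring
    simp [Function.comp, h1]

-- main invariant: A's peeled digit list equals B's read-off, for n in the k-digit group
theorem pvMain (k : Nat) (n : Int) (h1 : (2 : Int) ^ k - 2 < n) (h2 : n ≤ (2 : Int) ^ (k + 1) - 2) :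
    pvLoopA n = pvDigitsB (n - ((2 : Int) ^ k - 1)) k := by
  induction k generalizing n with
  | zero =>
    have hn : n = 0 := by simp at h1 h2; omega
    subst hn
    rw [pvLoopA]
    simp [pvDigitsB]
  | succ k ih =>
    have p1 : (2 : Int) ^ (k + 1) = 2 * 2 ^ k := by ring
    have p2 : (2 : Int) ^ (k + 2) = 4 * 2 ^ k := by ring
    have hp : (1 : Int) ≤ 2 ^ k := one_le_pow₀ (by norm_num)
    have h1' : 2 * (2 : Int) ^ k - 2 < n := by rw [← p1]; exact h1
    have h2' : n ≤ 4 * (2 : Int) ^ k - 2 := by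
      have : (2 : Int) ^ (k + 1 + 1) = 4 * 2 ^ k := by ring
      omega
    have hn1 : 1 ≤ n := by omega
    rw [pvLoopA, dif_pos hn1, pvDigitsB_succ,
        PySem.Int.mod_eq_emod_of_pos (a := n) (by omega),
        PySem.Int.mod_eq_emod_of_pos (by omega),
        PySem.Int.floordiv_eq_ediv_of_pos (by omega),
        PySem.Int.floordiv_eq_ediv_of_pos (by omega),
        PySem.Int.floordiv_eq_ediv_of_pos (by omega)]
    by_cases hodd : n % 2 = 1
    · rw [if_pos hodd, if_neg (by omega)]
      have hb1 : (2 : Int) ^ k - 2 < (n - 1) / 2 := by omega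
      have hb2 : (n - 1) / 2 ≤ (2 : Int) ^ (k + 1) - 2 := by omega
      have harg : (n - 1) / 2 - ((2 : Int) ^ k - 1) = (n - ((2 : Int) ^ (k + 1) - 1)) / 2 := by
        omega
      rw [ih _ hb1 hb2, harg]
    · rw [if_neg hodd, if_pos (by omega)]
      have hb1 : (2 : Int) ^ k - 2 < n / 2 - 1 := by omega
      have hb2 : n / 2 - 1 ≤ (2 : Int) ^ (k + 1) - 2 := by omega
      have harg : n / 2 - 1 - ((2 : Int) ^ k - 1) = (n - ((2 : Int) ^ (k + 1) - 1)) / 2 := by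
        omega
      rw [ih _ hb1 hb2, harg]

-- ===== VERDICT (by name: the statement is the Claim_ definition above) =====
theorem printNthElement2_spec : Claim_equal_printNthElement2 := by
  intro n _ hpre
  unfold Spec_printNthElement2 printNthElement2 printNthElement2_alt
  have hn : 1 ≤ n := hpre
  have h0 : (2 : Int) ^ 0 - 2 < n := by
    have : (2 : Int) ^ 0 = 1 := pow_zero 2
    omega
  obtain ⟨hl, hr⟩ := pvFindK_bounds n 0 h0
  rw [pvMain (pvFindK n 0) n hl hr]
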